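-- pv_equiv track=rewrite | github.com/rayandrew/io-benchmark | h5bench/fix_async_wrappers.py | parse_macro_call
-- ===== SOURCE A (Python) =====
-- def parse_macro_call(text, start_pos):
--     """Extract a complete macro call starting at start_pos, handling nested parens.
--     Returns (full_text, args_list) where args_list is the top-level arguments."""
--     # Find opening paren
--     paren_start = text.index('(', start_pos)
--     depth = 0
--     i = paren_start
--     while i < len(text):
--         if text[i] == '(':
--             depth += 1
--         elif text[i] == ')':
--             depth -= 1
--             if depth == 0:
--                 full = text[start_pos:i + 1]
--                 inner = text[paren_start + 1:i]
--                 args = split_top_level(inner)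
--                 return full, args
--         i += 1
--     return None, None
--
-- def split_top_level(text):
--     """Split text by commas at the top level (depth 0 for parens)."""
--     args = []
--     current = []
--     depth = 0
--     for ch in text:
--         if ch in '([':
--             depth += 1
--             current.append(ch)
--         elif ch in ')]':
--             depth -= 1
--             current.append(ch)
--         elif ch == ',' and depth == 0:
--             args.append(''.join(current).strip())
--             current = []
--         else:
--             current.append(ch)
--     if current:
--         args.append(''.join(current).strip())
--     return args
-- ===== SOURCE B (Python) =====
-- def parse_macro_call(text, start_pos):
--     """Extract a complete macro call starting at start_pos, handling nested parens.
--     Returns (full_text, args_list) where args_list is the top-level arguments."""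
--     paren_start = text.index('(', start_pos)
--     depth = 0
--     for off, ch in enumerate(text[paren_start:]):
--         if ch == '(':
--             depth += 1
--         elif ch == ')':
--             depth -= 1
--             if depth == 0:
--                 end = paren_start + off
--                 full = text[start_pos:end + 1]
--                 args = split_top_level(text[paren_start + 1:end])
--                 return full, args
--     return None, None
--
-- def split_top_level(text):
--     """Split by top-level commas in two passes: record the index of every
--     depth-0 comma, then slice text at those boundaries and strip each piece."""
--     cuts = []
--     depth = 0
--     for i, ch in enumerate(text):
--         if ch in '([':
--             depth += 1
--         elif ch in ')]':
--             depth -= 1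
--         elif ch == ',' and depth == 0:
--             cuts.append(i)
--     out = []
--     start = 0
--     for c in cuts:
--         out.append(text[start:c].strip())
--         start = c + 1
--     if start < len(text):
--         out.append(text[start:].strip())
--     return out
-- ===== Notes on version B (the rewrite author's own statement) =====
-- stated objective: alternative
-- what changed: split_top_level is rewritten as two passes (collect the indices of depth-0 commas, then slice the text at those boundaries and strip each segment) instead of accumulating characters into a current buffer, and the matching-paren scan iterates over enumerate(text[paren_start:]) instead of an index-based while loop.
import Mathlib
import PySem

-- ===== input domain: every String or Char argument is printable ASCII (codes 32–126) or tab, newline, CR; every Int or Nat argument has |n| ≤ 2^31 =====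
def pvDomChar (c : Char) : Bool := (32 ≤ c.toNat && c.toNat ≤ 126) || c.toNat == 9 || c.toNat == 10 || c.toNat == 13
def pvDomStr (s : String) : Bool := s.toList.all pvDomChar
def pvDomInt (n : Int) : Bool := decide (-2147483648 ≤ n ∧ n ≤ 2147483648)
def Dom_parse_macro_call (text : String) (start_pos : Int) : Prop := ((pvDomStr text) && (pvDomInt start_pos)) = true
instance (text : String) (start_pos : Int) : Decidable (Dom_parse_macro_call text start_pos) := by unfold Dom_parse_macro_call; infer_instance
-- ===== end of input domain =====

-- B rewrites split_top_level as two passes (record depth-0 comma indices, then slice and strip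
-- the segments) instead of accumulating characters, and scans for the matching ')' by iterating
-- over enumerate(text[paren_start:]) instead of an index-based while loop (objective: alternative).

-- ===== PORT A =====
-- ''.join(current).strip() — shared one-liner for "strip these chars, make a string"
def pvStripStr (cs : List Char) : String := String.ofList (PySem.Chars.strip cs)

-- one iteration of A's split_top_level loop; state = (args, current, depth)
def pvSplitStepA (st : List String × List Char × Int) (ch : Char) : List String × List Char × Int :=
  if ch = '(' ∨ ch = '[' then (st.1, st.2.1 ++ [ch], st.2.2 + 1)
  else if ch = ')' ∨ ch = ']' then (st.1, st.2.1 ++ [ch], st.2.2 - 1)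
  else if ch = ',' ∧ st.2.2 = 0 then (st.1 ++ [pvStripStr st.2.1], [], st.2.2)
  else (st.1, st.2.1 ++ [ch], st.2.2)

def split_top_level (cs : List Char) : List String :=
  let st := cs.foldl pvSplitStepA ([], [], 0)
  if st.2.1 ≠ [] then st.1 ++ [pvStripStr st.2.1] else st.1

-- A's 'while i < len(text)' loop
def pvLoopA (cs : List Char) (start_pos : Int) (paren_start i : Nat) (depth : Int) :
    Option String × Option (List String) :=
  if h : i < cs.length then
    if cs[i] = '(' then pvLoopA cs start_pos paren_start (i + 1) (depth + 1)
    else if cs[i] = ')' then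
      if depth - 1 = 0 then
        (some (String.ofList (PySem.Chars.slice cs (some start_pos) (some ((i : Int) + 1)))),
         some (split_top_level (PySem.Chars.slice cs (some ((paren_start : Int) + 1)) (some (i : Int)))))
      else pvLoopA cs start_pos paren_start (i + 1) (depth - 1)
    else pvLoopA cs start_pos paren_start (i + 1) depth
  else (none, none)
termination_by cs.length - i

def parse_macro_call (text : String) (start_pos : Int) : Option String × Option (List String) :=
  let j := PySem.Str.findFrom text "(" start_pos
  if j = -1 then (none, none)  -- Python raises ValueError here; excluded by Pre_
  else pvLoopA text.toList start_pos j.toNat j.toNat 0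

-- ===== PORT B =====
-- pass 1 of B's split_top_level: collect the index of every depth-0 comma
def pvCutStep (st : List Int × Int) (p : Int × Char) : List Int × Int :=
  if p.2 = '(' ∨ p.2 = '[' then (st.1, st.2 + 1)
  else if p.2 = ')' ∨ p.2 = ']' then (st.1, st.2 - 1)
  else if p.2 = ',' ∧ st.2 = 0 then (st.1 ++ [p.1], st.2)
  else (st.1, st.2)

-- pass 2 of B's split_top_level: slice at a cut and strip; state = (out, start)
def pvSegStep (cs : List Char) (st : List String × Int) (c : Int) : List String × Int :=
  (st.1 ++ [String.ofList (PySem.Chars.strip (PySem.Chars.slice cs (some st.2) (some c)))], c + 1)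

def split_top_level_alt (cs : List Char) : List String :=
  let cuts := ((PySem.List.enumerate cs).foldl pvCutStep ([], 0)).1
  let st := cuts.foldl (pvSegStep cs) ([], 0)
  if st.2 < (cs.length : Int) then
    st.1 ++ [String.ofList (PySem.Chars.strip (PySem.Chars.slice cs (some st.2) none))]
  else st.1

-- B's 'for off, ch in enumerate(text[paren_start:])' loop
def pvLoopB (cs : List Char) (start_pos : Int) (paren_start : Nat) :
    List (Int × Char) → Int → Option String × Option (List String)
  | [], _ => (none, none)
  | (off, ch) :: rest, depth =>
    if ch = '(' then pvLoopB cs start_pos paren_start rest (depth + 1)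
    else if ch = ')' then
      if depth - 1 = 0 then
        (some (String.ofList (PySem.Chars.slice cs (some start_pos) (some ((paren_start : Int) + off + 1)))),
         some (split_top_level_alt
           (PySem.Chars.slice cs (some ((paren_start : Int) + 1)) (some ((paren_start : Int) + off)))))
      else pvLoopB cs start_pos paren_start rest (depth - 1)
    else pvLoopB cs start_pos paren_start rest depth

def parse_macro_call_alt (text : String) (start_pos : Int) : Option String × Option (List String) :=
  let j := PySem.Str.findFrom text "(" start_pos
  if j = -1 then (none, none)  -- same ValueError in B's Python; excluded by Pre_
  else pvLoopB text.toList start_pos j.toNat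
    (PySem.List.enumerate (PySem.Chars.slice text.toList (some (j.toNat : Int)) none)) 0

-- ===== PRECONDITION & SPEC =====
-- Pre_ excludes exactly the inputs where text.index('(', start_pos) finds no '(' and both
-- Pythons raise ValueError.
def Pre_parse_macro_call (text : String) (start_pos : Int) : Prop :=
  PySem.Str.findFrom text "(" start_pos ≠ -1
instance (text : String) (start_pos : Int) : Decidable (Pre_parse_macro_call text start_pos) := by
  unfold Pre_parse_macro_call; infer_instance

def pvWitness_parse_macro_call : String × Int := ("f(a, (b,c))", 0)

def Spec_parse_macro_call (text : String) (start_pos : Int) (out : Option String × Option (List String)) : Prop := out = parse_macro_call_alt text start_pos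
instance (text : String) (start_pos : Int) (out : Option String × Option (List String)) : Decidable (Spec_parse_macro_call text start_pos out) := by unfold Spec_parse_macro_call; infer_instance

-- ===== CLAIM (what is proved, stated in full; the proofs are below) =====
def Claim_equal_parse_macro_call : Prop := ∀ (text : String) (start_pos : Int), Dom_parse_macro_call text start_pos → Pre_parse_macro_call text start_pos → Spec_parse_macro_call text start_pos (parse_macro_call text start_pos)

-- ===== LEMMAS AND PROOFS =====

-- Common skeleton of both splits: (head-piece, later raw pieces) of cs split at depth-0 commas.
def pvRaw : List Char → Int → List Char × List (List Char)
  | [], _ => ([], [])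
  | c :: cs, d =>
    if c = ',' ∧ d = 0 then ([], (pvRaw cs d).1 :: (pvRaw cs d).2)
    else
      let d' := if c = '(' ∨ c = '[' then d + 1 else if c = ')' ∨ c = ']' then d - 1 else d
      (c :: (pvRaw cs d').1, (pvRaw cs d').2)

-- Render raw pieces the way A does: strip each, drop the last piece iff it is empty.
def pvRender : List Char → List (List Char) → List String
  | h, [] => if h ≠ [] then [pvStripStr h] else []
  | h, q :: rest => pvStripStr h :: pvRender q rest

theorem splitA_eq_render (cs : List Char) : ∀ (d : Int) (args : List String) (cur : List Char),
    (let st := cs.foldl pvSplitStepA (args, cur, d);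
     if st.2.1 ≠ [] then st.1 ++ [pvStripStr st.2.1] else st.1)
    = args ++ pvRender (cur ++ (pvRaw cs d).1) ((pvRaw cs d).2) := by
  induction cs with
  | nil =>
    intro d args cur
    simp only [List.foldl_nil, pvRaw, List.append_nil]
    by_cases h : cur = [] <;> simp [h, pvRender]
  | cons c cs ih =>
    intro d args cur
    simp only [List.foldl_cons]
    by_cases h1 : c = '(' ∨ c = '['
    · have hc : ¬ (c = ',' ∧ d = 0) := by rcases h1 with h | h <;> simp [h]
      rw [show pvSplitStepA (args, cur, d) c = (args, cur ++ [c], d + 1) by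
        simp [pvSplitStepA, h1]]
      rw [ih (d + 1) args (cur ++ [c])]
      simp [pvRaw, hc, h1, List.append_assoc]
    · by_cases h2 : c = ')' ∨ c = ']'
      · have hc : ¬ (c = ',' ∧ d = 0) := by rcases h2 with h | h <;> simp [h]
        rw [show pvSplitStepA (args, cur, d) c = (args, cur ++ [c], d - 1) by
          simp [pvSplitStepA, h1, h2]]
        rw [ih (d - 1) args (cur ++ [c])]
        simp [pvRaw, hc, h1, h2, List.append_assoc]
      · by_cases h3 : c = ',' ∧ d = 0
        · rw [show pvSplitStepA (args, cur, d) c = (args ++ [pvStripStr cur], [], d) by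
            simp [pvSplitStepA, h3]]
          rw [ih d (args ++ [pvStripStr cur]) []]
          simp [pvRaw, h3, pvRender, List.append_assoc]
        · rw [show pvSplitStepA (args, cur, d) c = (args, cur ++ [c], d) by
            simp [pvSplitStepA, h1, h2, h3]]
          rw [ih d args (cur ++ [c])]
          simp [pvRaw, h1, h2, h3, List.append_assoc]

-- cuts the foldl over enumerate collects, in closed recursive form
def pvCutsAbs : List Char → Int → Int → List Int
  | [], _, _ => []
  | c :: cs, s, d =>
    if c = '(' ∨ c = '[' then pvCutsAbs cs (s + 1) (d + 1)
    else if c = ')' ∨ c = ']' then pvCutsAbs cs (s + 1) (d - 1)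
    else if c = ',' ∧ d = 0 then s :: pvCutsAbs cs (s + 1) d
    else pvCutsAbs cs (s + 1) d

def pvDepthAfter : List Char → Int → Int
  | [], d => d
  | c :: cs, d =>
    pvDepthAfter cs (if c = '(' ∨ c = '[' then d + 1 else if c = ')' ∨ c = ']' then d - 1 else d)

theorem cutsFold_eq (cs : List Char) : ∀ (s : Int) (acc : List Int) (d : Int),
    (PySem.List.enumerate cs s).foldl pvCutStep (acc, d)
      = (acc ++ pvCutsAbs cs s d, pvDepthAfter cs d) := by
  induction cs with
  | nil => intro s acc d; simp [PySem.List.enumerate_nil, pvCutsAbs, pvDepthAfter]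
  | cons c cs ih =>
    intro s acc d
    rw [PySem.List.enumerate_cons, List.foldl_cons]
    by_cases h1 : c = '(' ∨ c = '['
    · have hc : ¬ (c = ',' ∧ d = 0) := by rcases h1 with h | h <;> simp [h]
      rw [show pvCutStep (acc, d) (s, c) = (acc, d + 1) by simp [pvCutStep, h1]]
      rw [ih (s + 1) acc (d + 1)]
      simp [pvCutsAbs, pvDepthAfter, h1]
    · by_cases h2 : c = ')' ∨ c = ']'
      · rw [show pvCutStep (acc, d) (s, c) = (acc, d - 1) by simp [pvCutStep, h1, h2]]
        rw [ih (s + 1) acc (d - 1)]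
        simp [pvCutsAbs, pvDepthAfter, h1, h2]
      · by_cases h3 : c = ',' ∧ d = 0
        · rw [show pvCutStep (acc, d) (s, c) = (acc ++ [s], d) by simp [pvCutStep, h3]]
          rw [ih (s + 1) (acc ++ [s]) d]
          simp [pvCutsAbs, pvDepthAfter, h3, List.append_assoc]
        · rw [show pvCutStep (acc, d) (s, c) = (acc, d) by simp [pvCutStep, h1, h2, h3]]
          rw [ih (s + 1) acc d]
          simp [pvCutsAbs, pvDepthAfter, h1, h2, h3]

theorem segPass_eq_render (cs : List Char) : ∀ (d : Int) (full : List Char) (j k : Nat) (out : List String),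
    j ≤ k → k ≤ full.length → full.drop k = cs →
    (let st := (pvCutsAbs cs (k : Int) d).foldl (pvSegStep full) (out, (j : Int));
     if st.2 < (full.length : Int) then
       st.1 ++ [String.ofList (PySem.Chars.strip (PySem.Chars.slice full (some st.2) none))]
     else st.1)
    = out ++ pvRender ((full.drop j).take (k - j) ++ (pvRaw cs d).1) ((pvRaw cs d).2) := by
  induction cs with
  | nil =>
    intro d full j k out hj hk hdrop
    have hkl : k = full.length := by
      have := congrArg List.length hdrop
      simp [List.length_drop] at this
      omega
    subst hkl
    have htake : (full.drop j).take (full.length - j) = full.drop j := by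
      apply List.take_of_length_le
      simp [List.length_drop]
    simp only [pvCutsAbs, List.foldl_nil, pvRaw, List.append_nil, htake,
      PySem.Chars.slice_eq_listSlice, PySem.List.slice_from_natCast]
    by_cases hjl : j < full.length
    · have hne : full.drop j ≠ [] := by
        intro h
        have := congrArg List.length h
        simp [List.length_drop] at this
        omega
      rw [if_pos (by exact_mod_cast hjl)]
      simp [pvRender, hne, pvStripStr]
    · have heq : full.drop j = [] := List.drop_of_length_le (by omega)
      rw [if_neg (by exact_mod_cast hjl)]
      simp [pvRender, heq]
  | cons c cs ihc =>
    intro d full j k out hj hk hdrop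
    have hklt : k < full.length := by
      have := congrArg List.length hdrop
      simp [List.length_drop] at this
      omega
    have hcons := (List.drop_eq_getElem_cons hklt).symm.trans hdrop
    have hgk : full[k]'hklt = c := (List.cons.injEq _ _ _ _ ▸ hcons).1
    have hdrop' : full.drop (k + 1) = cs := (List.cons.injEq _ _ _ _ ▸ hcons).2
    have hc1 : ((k : Int) + 1) = ((k + 1 : Nat) : Int) := by push_cast; ring
    have htake : (full.drop j).take (k + 1 - j) = (full.drop j).take (k - j) ++ [c] := by
      have hidx : (full.drop j)[k - j]? = some c := by
        rw [List.getElem?_drop]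
        rw [show j + (k - j) = k by omega]
        simp [List.getElem?_eq_getElem hklt, hgk]
      rw [show k + 1 - j = (k - j) + 1 by omega, List.take_add_one, hidx]
      rfl
    by_cases h1 : c = '(' ∨ c = '['
    · have hc : ¬ (c = ',' ∧ d = 0) := by rcases h1 with h | h <;> simp [h]
      rw [show pvCutsAbs (c :: cs) (k : Int) d = pvCutsAbs cs ((k : Int) + 1) (d + 1) by
        simp [pvCutsAbs, h1]]
      rw [hc1, ihc (d + 1) full j (k + 1) out (by omega) (by omega) hdrop']
      simp [pvRaw, hc, h1, htake, List.append_assoc]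
    · by_cases h2 : c = ')' ∨ c = ']'
      · have hc : ¬ (c = ',' ∧ d = 0) := by rcases h2 with h | h <;> simp [h]
        rw [show pvCutsAbs (c :: cs) (k : Int) d = pvCutsAbs cs ((k : Int) + 1) (d - 1) by
          simp [pvCutsAbs, h1, h2]]
        rw [hc1, ihc (d - 1) full j (k + 1) out (by omega) (by omega) hdrop']
        simp [pvRaw, hc, h1, h2, htake, List.append_assoc]
      · by_cases h3 : c = ',' ∧ d = 0
        · rw [show pvCutsAbs (c :: cs) (k : Int) d = (k : Int) :: pvCutsAbs cs ((k : Int) + 1) d by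
            simp [pvCutsAbs, h3]]
          rw [List.foldl_cons]
          rw [show pvSegStep full (out, (j : Int)) (k : Int)
              = (out ++ [String.ofList (PySem.Chars.strip ((full.drop j).take (k - j)))], (k : Int) + 1) by
            simp [pvSegStep, PySem.Chars.slice_eq_listSlice, PySem.List.slice_natCast]]
          rw [hc1, ihc d full (k + 1) (k + 1) _ le_rfl (by omega) hdrop']
          simp [pvRaw, h3, pvRender, pvStripStr, List.append_assoc]
        · rw [show pvCutsAbs (c :: cs) (k : Int) d = pvCutsAbs cs ((k : Int) + 1) d by
            simp [pvCutsAbs, h1, h2, h3]]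
          rw [hc1, ihc d full j (k + 1) out (by omega) (by omega) hdrop']
          simp [pvRaw, h1, h2, h3, htake, List.append_assoc]

theorem split_eq (cs : List Char) : split_top_level cs = split_top_level_alt cs := by
  have hA := splitA_eq_render cs 0 [] []
  have hB := segPass_eq_render cs 0 cs 0 0 [] le_rfl (Nat.zero_le _) rfl
  simp only [Nat.cast_zero, List.drop_zero, List.nil_append] at hA hB
  unfold split_top_level split_top_level_alt
  rw [cutsFold_eq cs 0 [] 0]
  simp only [List.nil_append]
  exact hA.trans hB.symm

theorem loop_eq (cs : List Char) (sp : Int) (ps : Nat) :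
    ∀ (n k : Nat) (d : Int), cs.length - k = n → ps ≤ k →
    pvLoopB cs sp ps (PySem.List.enumerate (cs.drop k) ((k : Int) - (ps : Int))) d
      = pvLoopA cs sp ps k d := by
  intro n
  induction n with
  | zero =>
    intro k d hn hk
    have hlen : cs.length ≤ k := by omega
    rw [List.drop_of_length_le hlen, pvLoopA, dif_neg (by omega)]
    rfl
  | succ n ih =>
    intro k d hn hk
    have hklt : k < cs.length := by omega
    have hcast : (k : Int) - (ps : Int) + 1 = ((k + 1 : Nat) : Int) - (ps : Int) := by
      push_cast; ring
    have hoff : (ps : Int) + ((k : Int) - (ps : Int)) = (k : Int) := by ring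
    rw [List.drop_eq_getElem_cons hklt, PySem.List.enumerate_cons, pvLoopA, dif_pos hklt]
    simp only [pvLoopB]
    by_cases h1 : cs[k] = '('
    · rw [if_pos h1, if_pos h1, hcast]
      exact ih (k + 1) (d + 1) (by omega) (by omega)
    · rw [if_neg h1, if_neg h1]
      by_cases h2 : cs[k] = ')'
      · rw [if_pos h2, if_pos h2]
        by_cases h3 : d - 1 = 0
        · rw [if_pos h3, if_pos h3, hoff, split_eq]
        · rw [if_neg h3, if_neg h3, hcast]
          exact ih (k + 1) (d - 1) (by omega) (by omega)
      · rw [if_neg h2, if_neg h2, hcast]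
        exact ih (k + 1) d (by omega) (by omega)

-- ===== VERDICT (by name: the statement is the Claim_ definition above) =====
theorem parse_macro_call_spec : Claim_equal_parse_macro_call := by
  intro text sp _ hpre
  unfold Pre_parse_macro_call at hpre
  unfold Spec_parse_macro_call parse_macro_call parse_macro_call_alt
  simp only [if_neg hpre, PySem.Chars.slice_eq_listSlice, PySem.List.slice_from_natCast]
  have h := loop_eq text.toList sp (PySem.Str.findFrom text "(" sp).toNat
    (text.toList.length - (PySem.Str.findFrom text "(" sp).toNat)
    (PySem.Str.findFrom text "(" sp).toNat 0 rfl le_rfl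
  rw [sub_self] at h
  exact h.symm
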